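-- pv_equiv track=rewrite | github.com/mbuchove/notebook-wurk-b | python_practice/find_box.py | add_box_to_matrix
-- ===== SOURCE A (Python) =====
-- def add_box_to_matrix(matrix, xbl, ybl, xtr, ytr):
--     """add another box to a matrix by filling 1s to the appropriate coordinates"""
--     overlap = False
--     for x in range(xbl, xtr+1):
--         for y in range(ybl, ytr+1):
--             if matrix[y][x] == 1:
--                 overlap = True
--             else:
--                 matrix[y][x] = 1
--
--     return overlap
-- ===== SOURCE B (Python) =====
-- def add_box_to_matrix(matrix, xbl, ybl, xtr, ytr):
--     """add another box to a matrix by filling 1s to the appropriate coordinates"""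
--     if xtr < xbl or ytr < ybl:
--         return False  # empty box: nothing to scan or fill
--     # detection pass (read-only), then bulk fill pass by row slices
--     overlap = any(matrix[y][x] == 1
--                   for y in range(ybl, ytr + 1)
--                   for x in range(xbl, xtr + 1))
--     fill = [1] * (xtr + 1 - xbl)
--     for y in range(ybl, ytr + 1):
--         matrix[y][xbl:xtr + 1] = fill
--     return overlap
-- ===== Notes on version B (the rewrite author's own statement) =====
-- stated objective: simpler
-- what changed: B separates detection from mutation: a single read-only any() over the rectangle computes the overlap flag, then each row is filled in bulk with one slice assignment instead of A's interleaved per-cell test-and-write nested loops.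
-- outside the precondition, e.g. on add_box_to_matrix([[0, 0]], -2, 0, 0, 0): A returns True, B returns False
import Mathlib
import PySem

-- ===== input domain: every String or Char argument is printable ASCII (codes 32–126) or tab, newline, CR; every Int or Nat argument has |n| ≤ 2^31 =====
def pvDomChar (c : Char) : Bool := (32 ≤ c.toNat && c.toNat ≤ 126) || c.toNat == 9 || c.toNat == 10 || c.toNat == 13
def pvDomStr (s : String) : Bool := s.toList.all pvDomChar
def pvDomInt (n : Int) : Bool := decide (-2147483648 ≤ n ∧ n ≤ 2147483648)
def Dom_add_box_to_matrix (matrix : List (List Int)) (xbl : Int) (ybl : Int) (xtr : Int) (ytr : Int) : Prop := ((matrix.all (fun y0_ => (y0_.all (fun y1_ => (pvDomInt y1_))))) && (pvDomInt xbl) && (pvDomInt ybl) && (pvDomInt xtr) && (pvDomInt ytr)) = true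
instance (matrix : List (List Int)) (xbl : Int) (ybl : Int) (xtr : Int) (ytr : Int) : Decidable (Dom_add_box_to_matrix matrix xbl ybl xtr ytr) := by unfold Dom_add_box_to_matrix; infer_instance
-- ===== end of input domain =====

-- B separates overlap detection (one read-only pass) from the fill (bulk slice assignment per row);
-- both programs mutate `matrix` in place — the equivalence proved here is about the RETURN value only.

-- ===== PORT A =====
-- matrix[y][x] read; exact for the non-negative in-range indices admitted by Pre_
def pvCellA (m : List (List Int)) (y x : Int) : Int :=
  PySem.List.pyGetD (PySem.List.pyGetD m y []) x 0
-- matrix[y][x] = 1; exact for the non-negative in-range indices admitted by Pre_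
def pvSetA (m : List (List Int)) (y x : Int) : List (List Int) :=
  m.set y.toNat ((PySem.List.pyGetD m y []).set x.toNat 1)

def add_box_to_matrix (matrix : List (List Int)) (xbl : Int) (ybl : Int) (xtr : Int) (ytr : Int) : Bool :=
  ((PySem.List.pyRange xbl (xtr + 1) 1).foldl
    (fun s x =>
      (PySem.List.pyRange ybl (ytr + 1) 1).foldl
        (fun s2 y =>
          if pvCellA s2.1 y x == 1 then (s2.1, true) else (pvSetA s2.1 y x, s2.2))
        s)
    (matrix, false)).2

-- ===== PORT B =====
def add_box_to_matrix_alt (matrix : List (List Int)) (xbl : Int) (ybl : Int) (xtr : Int) (ytr : Int) : Bool :=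
  -- B's fill pass is an in-place mutation with no effect on the return value; only the
  -- early return and the read-only detection pass determine the result.
  if xtr < xbl ∨ ytr < ybl then false
  else
    (PySem.List.pyRange ybl (ytr + 1) 1).any (fun y =>
      (PySem.List.pyRange xbl (xtr + 1) 1).any (fun x =>
        PySem.List.pyGetD (PySem.List.pyGetD matrix y []) x 0 == 1))

-- ===== PRECONDITION & SPEC =====
-- Pre_ excludes nonempty boxes with a negative or out-of-range coordinate: out of range both
-- programs raise IndexError, and negative in-range indices alias cells through Python's
-- wraparound — a corner nobody would specify, where A's flag depends on rereading cells its own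
-- loop just wrote and B's slice fill reshapes rows, so both values are implementation accidents.
def Pre_add_box_to_matrix (matrix : List (List Int)) (xbl : Int) (ybl : Int) (xtr : Int) (ytr : Int) : Prop :=
  xbl ≤ xtr → ybl ≤ ytr →
    0 ≤ xbl ∧ 0 ≤ ybl ∧ ytr < (matrix.length : Int) ∧
      ∀ y ∈ PySem.List.pyRange ybl (ytr + 1) 1,
        xtr < ((PySem.List.pyGetD matrix y []).length : Int)
instance (matrix : List (List Int)) (xbl : Int) (ybl : Int) (xtr : Int) (ytr : Int) : Decidable (Pre_add_box_to_matrix matrix xbl ybl xtr ytr) := by unfold Pre_add_box_to_matrix; infer_instance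

def pvWitness_add_box_to_matrix : List (List Int) × Int × Int × Int × Int :=
  ([[0, 1, 0], [0, 0, 0]], 0, 0, 2, 1)

def Spec_add_box_to_matrix (matrix : List (List Int)) (xbl : Int) (ybl : Int) (xtr : Int) (ytr : Int) (out : Bool) : Prop := out = add_box_to_matrix_alt matrix xbl ybl xtr ytr
instance (matrix : List (List Int)) (xbl : Int) (ybl : Int) (xtr : Int) (ytr : Int) (out : Bool) : Decidable (Spec_add_box_to_matrix matrix xbl ybl xtr ytr out) := by unfold Spec_add_box_to_matrix; infer_instance

-- ===== CLAIM (what is proved, stated in full; the proofs are below) =====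
def Claim_equal_add_box_to_matrix : Prop := ∀ (matrix : List (List Int)) (xbl : Int) (ybl : Int) (xtr : Int) (ytr : Int), Dom_add_box_to_matrix matrix xbl ybl xtr ytr → Pre_add_box_to_matrix matrix xbl ybl xtr ytr → Spec_add_box_to_matrix matrix xbl ybl xtr ytr (add_box_to_matrix matrix xbl ybl xtr ytr)

-- ===== LEMMAS AND PROOFS =====

-- A cell other than (i, j) is unchanged by writing 1 at (i, j) (Nat indices).
theorem pvCellNat (m : List (List Int)) (i j i' j' : Nat) (h : i' ≠ i ∨ j' ≠ j) :
    ((m.set i ((m.getD i []).set j (1 : Int))).getD i' []).getD j' 0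
      = (m.getD i' []).getD j' 0 := by
  simp only [List.getD_eq_getElem?_getD]
  by_cases hii : i' = i
  · subst hii
    have hj : j' ≠ j := by tauto
    by_cases hl : i' < m.length
    · rw [List.getElem?_set_self hl]
      simp only [Option.getD_some]
      rw [List.getElem?_set_ne (fun hh => hj hh.symm)]
    · rw [List.set_eq_of_length_le (by omega)]
  · rw [List.getElem?_set_ne (fun hh => hii hh.symm)]

-- A cell other than (y, x) is unchanged by pvSetA m y x (all indices non-negative).
theorem pvCellA_set_ne (m : List (List Int)) (y x y' x' : Int)
    (hy : 0 ≤ y) (hx : 0 ≤ x) (hy' : 0 ≤ y') (hx' : 0 ≤ x')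
    (h : y' ≠ y ∨ x' ≠ x) :
    pvCellA (pvSetA m y x) y' x' = pvCellA m y' x' := by
  unfold pvCellA pvSetA
  rw [← Int.toNat_of_nonneg hy, ← Int.toNat_of_nonneg hy', ← Int.toNat_of_nonneg hx,
    ← Int.toNat_of_nonneg hx']
  simp only [Int.toNat_natCast, PySem.List.pyGetD_natCast]
  refine pvCellNat m y.toNat x.toNat y'.toNat x'.toNat ?_
  rcases h with h | h
  · exact Or.inl (by omega)
  · exact Or.inr (by omega)

-- Inner loop (fixed column x): the flag accumulates the OR of the ORIGINAL cells of the column,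
-- and every cell in a different column is left unchanged.
theorem pvInnerA (x : Int) (ys : List Int) (m : List (List Int)) (ov : Bool)
    (hx : 0 ≤ x) (hys : ∀ y ∈ ys, 0 ≤ y) (hnd : ys.Pairwise (· ≠ ·)) :
    (ys.foldl (fun s2 y => if pvCellA s2.1 y x == 1 then (s2.1, true) else (pvSetA s2.1 y x, s2.2)) (m, ov)).2
        = (ov || ys.any (fun y => pvCellA m y x == 1)) ∧
    ∀ y' x', 0 ≤ y' → 0 ≤ x' → x' ≠ x →
      pvCellA ((ys.foldl (fun s2 y => if pvCellA s2.1 y x == 1 then (s2.1, true) else (pvSetA s2.1 y x, s2.2)) (m, ov)).1) y' x'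
        = pvCellA m y' x' := by
  induction ys generalizing m ov with
  | nil => simp
  | cons y t ih =>
    have hy : 0 ≤ y := hys y (by simp)
    have ht : ∀ y' ∈ t, 0 ≤ y' := fun y' h => hys y' (by simp [h])
    have hndt : t.Pairwise (· ≠ ·) := hnd.of_cons
    have hhead : ∀ y' ∈ t, y ≠ y' := fun y' hm => List.rel_of_pairwise_cons hnd hm
    by_cases hc : (pvCellA m y x == 1) = true
    · obtain ⟨ih1, ih2⟩ := ih m true ht hndt
      constructor
      · simp only [List.foldl_cons]
        rw [if_pos hc, ih1]
        simp [hc]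
      · intro y' x' h1 h2 h3
        simp only [List.foldl_cons]
        rw [if_pos hc]
        exact ih2 y' x' h1 h2 h3
    · have hcf : (pvCellA m y x == 1) = false := by
        exact Bool.eq_false_iff.mpr (fun hh => hc hh)
      obtain ⟨ih1, ih2⟩ := ih (pvSetA m y x) ov ht hndt
      have hrw : ∀ y' ∈ t, (pvCellA (pvSetA m y x) y' x == 1) = (pvCellA m y' x == 1) := by
        intro y' hmem
        rw [pvCellA_set_ne m y x y' x hy hx (ht y' hmem) hx (Or.inl (Ne.symm (hhead y' hmem)))]
      constructor
      · simp only [List.foldl_cons]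
        rw [if_neg hc, ih1, PySem.List.any_congr_mem hrw]
        simp [List.any_cons, hcf]
      · intro y' x' h1 h2 h3
        simp only [List.foldl_cons]
        rw [if_neg hc, ih2 y' x' h1 h2 h3,
          pvCellA_set_ne m y x y' x' hy hx h1 h2 (Or.inr h3)]

-- Outer loop: the returned flag is the OR of the ORIGINAL cells of the whole rectangle.
theorem pvOuterA (xs ys : List Int) (m : List (List Int)) (ov : Bool)
    (hxs : ∀ x ∈ xs, 0 ≤ x) (hys : ∀ y ∈ ys, 0 ≤ y)
    (hndx : xs.Pairwise (· ≠ ·)) (hndy : ys.Pairwise (· ≠ ·)) :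
    (xs.foldl (fun s x =>
        ys.foldl (fun s2 y => if pvCellA s2.1 y x == 1 then (s2.1, true) else (pvSetA s2.1 y x, s2.2)) s)
      (m, ov)).2
      = (ov || xs.any (fun x => ys.any (fun y => pvCellA m y x == 1))) := by
  induction xs generalizing m ov with
  | nil => simp
  | cons x t ih =>
    have hx : 0 ≤ x := hxs x (by simp)
    have ht : ∀ x' ∈ t, 0 ≤ x' := fun x' h => hxs x' (by simp [h])
    have hhead : ∀ x' ∈ t, x ≠ x' := fun x' hm => List.rel_of_pairwise_cons hndx hm
    obtain ⟨h1, h2⟩ := pvInnerA x ys m ov hx hys hndy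
    set s1 := ys.foldl (fun s2 y => if pvCellA s2.1 y x == 1 then (s2.1, true) else (pvSetA s2.1 y x, s2.2)) (m, ov) with hs1
    have hih := ih s1.1 s1.2 ht hndx.of_cons
    simp only [List.foldl_cons, ← hs1]
    rw [hih, h1]
    have hrw : ∀ x' ∈ t,
        (ys.any (fun y => pvCellA s1.1 y x' == 1)) = (ys.any (fun y => pvCellA m y x' == 1)) := by
      intro x' hmem
      refine PySem.List.any_congr_mem ?_
      intro y hymem
      rw [h2 y x' (hys y hymem) (ht x' hmem) (Ne.symm (hhead x' hmem))]
    rw [PySem.List.any_congr_mem hrw]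
    simp only [List.any_cons]
    rw [Bool.or_assoc]

theorem pvAnySwap (xs ys : List Int) (p : Int → Int → Bool) :
    xs.any (fun x => ys.any (fun y => p x y)) = ys.any (fun y => xs.any (fun x => p x y)) := by
  rw [Bool.eq_iff_iff]
  simp only [List.any_eq_true]
  tauto

-- ===== VERDICT (by name: the statement is the Claim_ definition above) =====
theorem add_box_to_matrix_spec : Claim_equal_add_box_to_matrix := by
  intro matrix xbl ybl xtr ytr _ hpre
  unfold Spec_add_box_to_matrix add_box_to_matrix add_box_to_matrix_alt
  by_cases hx : xbl ≤ xtr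
  · by_cases hy : ybl ≤ ytr
    · obtain ⟨hx0, hy0, _, _⟩ := hpre hx hy
      rw [if_neg (by omega)]
      rw [pvOuterA _ _ matrix false
        (fun x hm => by simp only [PySem.List.mem_pyRange_one] at hm; omega)
        (fun y hm => by simp only [PySem.List.mem_pyRange_one] at hm; omega)
        (List.Pairwise.imp (fun h => Int.ne_of_lt h) (PySem.List.pairwise_lt_pyRange_one xbl (xtr + 1)))
        (List.Pairwise.imp (fun h => Int.ne_of_lt h) (PySem.List.pairwise_lt_pyRange_one ybl (ytr + 1)))]
      rw [Bool.false_or, pvAnySwap]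
      rfl
    · rw [if_pos (by omega), PySem.List.pyRange_one_eq_nil (by omega : ytr + 1 ≤ ybl)]
      simp [List.foldl_fixed]
  · rw [if_pos (by omega), PySem.List.pyRange_one_eq_nil (by omega : xtr + 1 ≤ xbl)]
    simp
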